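-- pv_equiv track=rewrite | github.com/paiml/depyler | examples/hard_realworld_log_parse.py | search_logs
-- ===== SOURCE A (Python) =====
-- def log_find_bracket(text: str, start: int) -> int:
--     """Find first ] in text from start. Returns -1 if not found."""
--     idx: int = start
--     while idx < len(text):
--         if text[idx] == "]":
--             return idx
--         idx = idx + 1
--     return -1
--
-- def log_find_colon(text: str, start: int) -> int:
--     """Find first : in text from start. Returns -1 if not found."""
--     idx: int = start
--     while idx < len(text):
--         if text[idx] == ":":
--             return idx
--         idx = idx + 1
--     return -1
--
-- def log_substr(text: str, start: int, end: int) -> str: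
--     """Extract substring from start to end (exclusive)."""
--     result: str = ""
--     idx: int = start
--     while idx < end and idx < len(text):
--         result = result + text[idx]
--         idx = idx + 1
--     return result
--
-- def log_strip(text: str) -> str:
--     """Remove leading and trailing spaces."""
--     start: int = 0
--     while start < len(text) and text[start] == " ":
--         start = start + 1
--     end: int = len(text)
--     while end > start and text[end - 1] == " ":
--         end = end - 1
--     return log_substr(text, start, end)
--
-- def parse_message(line: str) -> str:
--     """Extract message body from log line after level."""
--     bracket_end: int = log_find_bracket(line, 0)
--     if bracket_end == -1:
--         return line
--     rest: str = log_substr(line, bracket_end + 1, len(line))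
--     rest = log_strip(rest)
--     colon_pos: int = log_find_colon(rest, 0)
--     if colon_pos == -1:
--         return rest
--     msg: str = log_substr(rest, colon_pos + 1, len(rest))
--     return log_strip(msg)
--
-- def contains_text(text: str, needle: str) -> int:
--     """Check if text contains needle. Returns 1 if yes."""
--     if len(needle) == 0:
--         return 1
--     if len(needle) > len(text):
--         return 0
--     idx: int = 0
--     while idx <= len(text) - len(needle):
--         match_ok: int = 1
--         j: int = 0
--         while j < len(needle):
--             if text[idx + j] != needle[j]:
--                 match_ok = 0
--                 j = len(needle)
--             else:
--                 j = j + 1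
--         if match_ok == 1:
--             return 1
--         idx = idx + 1
--     return 0
--
-- def search_logs(lines: list[str], search_term: str) -> list[str]:
--     """Search log lines for a substring in the message."""
--     result: list[str] = []
--     idx: int = 0
--     while idx < len(lines):
--         msg: str = parse_message(lines[idx])
--         if contains_text(msg, search_term) == 1:
--             result.append(lines[idx])
--         idx = idx + 1
--     return result
-- ===== SOURCE B (Python) =====
-- def _message(line: str) -> str:
--     """Message body of a log line, using native str ops."""
--     b = line.find("]")
--     if b == -1:
--         return line
--     rest = line[b + 1:].strip(" ")
--     c = rest.find(":")
--     if c == -1: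
--         return rest
--     return rest[c + 1:].strip(" ")
--
-- def search_logs(lines: list[str], search_term: str) -> list[str]:
--     return [line for line in lines if search_term in _message(line)]
-- ===== Notes on version B (the rewrite author's own statement) =====
-- stated objective: faster
-- what changed: Replaced the char-by-char index loops (hand-rolled find, substring built by repeated concatenation, naive O(n*m) substring search) with native str.find, slicing, strip(' ') and the 'in' operator, and the index-driven result loop with a list comprehension.
import Mathlib
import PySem

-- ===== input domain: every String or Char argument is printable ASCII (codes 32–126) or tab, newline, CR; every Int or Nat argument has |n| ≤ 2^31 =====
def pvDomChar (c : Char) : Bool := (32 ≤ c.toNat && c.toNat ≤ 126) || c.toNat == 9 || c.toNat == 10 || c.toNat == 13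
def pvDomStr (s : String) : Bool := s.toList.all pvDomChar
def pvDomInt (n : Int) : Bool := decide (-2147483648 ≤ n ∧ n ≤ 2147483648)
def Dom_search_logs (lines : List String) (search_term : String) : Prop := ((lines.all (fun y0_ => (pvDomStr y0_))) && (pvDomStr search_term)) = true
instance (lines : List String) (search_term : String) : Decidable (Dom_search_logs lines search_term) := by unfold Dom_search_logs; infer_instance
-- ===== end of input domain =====

-- B replaces A's char-by-char index loops (hand-rolled find, substring built by repeated
-- concatenation, naive substring search) with native find, slicing, strip(' ') and the 'in'
-- operator; objective: faster.


-- ===== PORT A =====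
-- log_find_bracket / log_find_colon (identical loops, parametrised by the target char);
-- the index is kept as a Nat: A always starts at 0 and only increments it.
def pvScanA (t : Char) (cs : List Char) (idx : Nat) : Int :=
  if h : idx < cs.length then
    if cs[idx] = t then (idx : Int) else pvScanA t cs (idx + 1)
  else -1
termination_by cs.length - idx

-- log_substr's while loop (start is a Nat: every call site of A passes a non-negative start)
def pvSubstrA (cs : List Char) (idx : Nat) (e : Int) (acc : List Char) : List Char :=
  if h : (idx : Int) < e ∧ idx < cs.length then
    pvSubstrA cs (idx + 1) e (acc ++ [cs[idx]'h.2])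
  else acc
termination_by cs.length - idx

-- log_strip's first while loop
def pvStripStartA (cs : List Char) (s : Nat) : Nat :=
  if h : s < cs.length then
    if cs[s] = ' ' then pvStripStartA cs (s + 1) else s
  else s
termination_by cs.length - s

-- log_strip's second while loop (text[end-1] via getD; end - 1 is in range whenever read)
def pvStripEndA (cs : List Char) (s e : Nat) : Nat :=
  if s < e ∧ cs.getD (e - 1) 'x' = ' ' then pvStripEndA cs s (e - 1) else e
termination_by e

def log_stripA (cs : List Char) : List Char :=
  let s := pvStripStartA cs 0
  let e := pvStripEndA cs s cs.length
  pvSubstrA cs s (e : Int) []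

def parse_messageA (cs : List Char) : List Char :=
  let b := pvScanA ']' cs 0
  if b = -1 then cs
  else
    let rest := log_stripA (pvSubstrA cs (b + 1).toNat (cs.length : Int) [])
    let c := pvScanA ':' rest 0
    if c = -1 then rest
    else log_stripA (pvSubstrA rest (c + 1).toNat (rest.length : Int) [])

-- contains_text's inner while loop (match_ok/j state; j = len(needle) on mismatch = return 0)
def pvMatchAtA (t n : List Char) (idx j : Nat) : Nat :=
  if h : j < n.length then
    if t.getD (idx + j) 'x' ≠ n[j] then 0 else pvMatchAtA t n idx (j + 1)
  else 1
termination_by n.length - j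

-- contains_text's outer while loop
def pvContainsLoopA (t n : List Char) (idx : Nat) : Int :=
  if idx ≤ t.length - n.length then
    if pvMatchAtA t n idx 0 = 1 then 1 else pvContainsLoopA t n (idx + 1)
  else 0
termination_by t.length - n.length + 1 - idx

def contains_textA (t n : List Char) : Int :=
  if n.length = 0 then 1
  else if n.length > t.length then 0
  else pvContainsLoopA t n 0

def search_logs (lines : List String) (search_term : String) : List String :=
  lines.foldl (fun acc line =>
    if contains_textA (parse_messageA line.toList) search_term.toList = 1
    then acc ++ [line] else acc) []

-- ===== PORT B =====
-- s.strip(' ') : drop leading spaces, then trailing spaces (exact port of str.strip(" "))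
def pvStripSp (cs : List Char) : List Char :=
  ((cs.dropWhile (· == ' ')).reverse.dropWhile (· == ' ')).reverse

def pvMessageB (cs : List Char) : List Char :=
  let b := PySem.Chars.find cs [']']
  if b = -1 then cs
  else
    let rest := pvStripSp (PySem.Chars.slice cs (some (b + 1)) none)
    let c := PySem.Chars.find rest [':']
    if c = -1 then rest
    else pvStripSp (PySem.Chars.slice rest (some (c + 1)) none)

def search_logs_alt (lines : List String) (search_term : String) : List String :=
  lines.filter (fun line => PySem.Chars.isIn search_term.toList (pvMessageB line.toList))

-- ===== PRECONDITION & SPEC =====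
def Spec_search_logs (lines : List String) (search_term : String) (out : List String) : Prop := out = search_logs_alt lines search_term
instance (lines : List String) (search_term : String) (out : List String) : Decidable (Spec_search_logs lines search_term out) := by unfold Spec_search_logs; infer_instance

-- ===== CLAIM (what is proved, stated in full; the proofs are below) =====
def Claim_equal_search_logs : Prop := ∀ (lines : List String) (search_term : String), Dom_search_logs lines search_term → Spec_search_logs lines search_term (search_logs lines search_term)

-- ===== LEMMAS AND PROOFS =====

theorem pvScanA_eq_go (t : Char) (cs : List Char) (idx : Nat) :
    pvScanA t cs idx = PySem.Chars.find.go [t] (cs.drop idx) idx := by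
  fun_induction pvScanA t cs idx with
  | case1 idx h heq =>
    rw [List.drop_eq_getElem_cons h]
    simp [PySem.Chars.find.go, List.isPrefixOf, heq]
  | case2 idx h hne ih =>
    rw [List.drop_eq_getElem_cons h]
    simp [PySem.Chars.find.go, List.isPrefixOf, Ne.symm hne, ih]
  | case3 idx h =>
    rw [List.drop_eq_nil_of_le (by omega)]
    simp [PySem.Chars.find.go]

theorem pvScanA_ge (t : Char) (cs : List Char) (idx : Nat) : -1 ≤ pvScanA t cs idx := by
  fun_induction pvScanA t cs idx <;> simp_all

theorem pvSubstrA_eq (cs : List Char) (idx : Nat) (e : Int) (acc : List Char) :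
    pvSubstrA cs idx e acc = acc ++ (cs.drop idx).take ((min e (cs.length : Int) - idx).toNat) := by
  fun_induction pvSubstrA cs idx e acc with
  | case1 idx acc h ih =>
    rw [ih, List.drop_eq_getElem_cons h.2]
    have h1 : (min e (cs.length : Int) - idx).toNat = (min e (cs.length : Int) - (idx+1)).toNat + 1 := by
      omega
    rw [h1, List.take_succ_cons]
    simp
  | case2 idx acc h =>
    have h1 : (min e (cs.length : Int) - idx).toNat = 0 ∨ (idx : Nat) ≥ cs.length := by omega
    rcases h1 with h1 | h1
    · simp [h1]
    · simp [List.drop_eq_nil_of_le h1]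

theorem pvStripStartA_eq (cs : List Char) (idx : Nat) :
    pvStripStartA cs idx = idx + ((cs.drop idx).takeWhile (· == ' ')).length := by
  fun_induction pvStripStartA cs idx with
  | case1 idx h heq ih =>
    rw [ih, List.drop_eq_getElem_cons h, List.takeWhile_cons]
    simp [heq]; omega
  | case2 idx h hne =>
    rw [List.drop_eq_getElem_cons h, List.takeWhile_cons]
    simp [hne]
  | case3 idx h =>
    rw [List.drop_eq_nil_of_le (by omega)]
    simp

theorem pvStripEndA_le (cs : List Char) (s e : Nat) : pvStripEndA cs s e ≤ e := by
  fun_induction pvStripEndA cs s e <;> omega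

theorem pvStripEndA_take (cs : List Char) (s e : Nat) (hs : s ≤ e) (he : e ≤ cs.length) :
    (cs.drop s).take (pvStripEndA cs s e - s)
      = (((cs.drop s).take (e - s)).reverse.dropWhile (· == ' ')).reverse := by
  fun_induction pvStripEndA cs s e with
  | case1 e h ih =>
    rw [ih (by omega : s ≤ e - 1) (by omega)]
    have h2 : e - 1 < cs.length := by omega
    have h3 : (cs.drop s).take (e - s) = (cs.drop s).take (e - 1 - s) ++ [cs[e-1]] := by
      have : e - s = (e - 1 - s) + 1 := by omega
      rw [this, List.take_add_one, List.getElem?_drop]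
      have : s + (e - 1 - s) = e - 1 := by omega
      rw [this, List.getElem?_eq_getElem h2]
      simp
    rw [h3]
    have hsp : cs[e-1] = ' ' := by
      have := h.2; rwa [List.getD_eq_getElem cs 'x' h2] at this
    simp [hsp]
  | case2 e h =>
    rcases Nat.eq_or_lt_of_le hs with heq | hlt
    · simp [← heq]
    · -- e > s and cs[e-1] ≠ ' '
      have h2 : e - 1 < cs.length := by omega
      have hns : ¬ cs[e-1] = ' ' := by
        intro hc
        exact h ⟨hlt, by rw [List.getD_eq_getElem cs 'x' h2]; exact hc⟩
      have h3 : (cs.drop s).take (e - s) = (cs.drop s).take (e - 1 - s) ++ [cs[e-1]] := by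
        have : e - s = (e - 1 - s) + 1 := by omega
        rw [this, List.take_add_one, List.getElem?_drop]
        have : s + (e - 1 - s) = e - 1 := by omega
        rw [this, List.getElem?_eq_getElem h2]
        simp
      rw [h3]
      simp [hns]

theorem pvMatchAtA_eq (t n : List Char) (idx j : Nat) (hlen : idx + n.length ≤ t.length)
    (hj : j ≤ n.length) :
    (pvMatchAtA t n idx j = 1 ↔ List.isPrefixOf (n.drop j) (t.drop (idx + j)) = true) := by
  fun_induction pvMatchAtA t n idx j with
  | case1 j h hne =>
    have h2 : idx + j < t.length := by omega
    rw [List.drop_eq_getElem_cons h, List.drop_eq_getElem_cons h2]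
    rw [List.getD_eq_getElem t 'x' h2] at hne
    simp [List.isPrefixOf]
    intro hc
    exact absurd hc.symm hne
  | case2 j h heq ih =>
    have h2 : idx + j < t.length := by omega
    rw [List.getD_eq_getElem t 'x' h2] at heq
    have heq' : t[idx + j] = n[j] := by by_contra hc; exact heq hc
    rw [ih (by omega)]
    rw [List.drop_eq_getElem_cons h, List.drop_eq_getElem_cons h2]
    simp [List.isPrefixOf, heq']
    rw [Nat.add_assoc]
  | case3 j h =>
    have : j = n.length := by omega
    simp [this]

theorem go_eq_neg_one_of_short (n : List Char) (hn : n ≠ []) :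
    ∀ (s : List Char) (k : Nat), s.length < n.length → PySem.Chars.find.go n s k = -1 := by
  intro s
  induction s with
  | nil => intro k _; simp [PySem.Chars.find.go, List.isEmpty_iff, hn]
  | cons h tl ih =>
    intro k hs
    have hp : ¬ n.isPrefixOf (h :: tl) = true := by
      intro hc
      have := (List.isPrefixOf_iff_prefix.mp hc).length_le
      simp at this hs; omega
    simp only [PySem.Chars.find.go, hp]
    exact ih (k + 1) (by simp at hs ⊢; omega)

theorem pvContainsLoopA_eq (t n : List Char) (hn : n ≠ []) (hle : n.length ≤ t.length)
    (idx : Nat) :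
    pvContainsLoopA t n idx
      = if PySem.Chars.find.go n (t.drop idx) idx = -1 then 0 else 1 := by
  fun_induction pvContainsLoopA t n idx with
  | case1 idx h hm =>
    have h2 : idx < t.length := by
      have := List.length_pos_iff.mpr hn; omega
    have hpre := (pvMatchAtA_eq t n idx 0 (by omega) (by omega)).mp hm
    simp only [List.drop_zero, Nat.add_zero] at hpre
    rw [List.drop_eq_getElem_cons h2]
    have hp : n.isPrefixOf (t[idx] :: t.drop (idx + 1)) = true := by
      rw [← List.drop_eq_getElem_cons h2]; exact hpre
    simp only [PySem.Chars.find.go, hp, if_pos]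
    simp
  | case2 idx h hm ih =>
    have h2 : idx < t.length := by
      have := List.length_pos_iff.mpr hn; omega
    have hp : ¬ n.isPrefixOf (t[idx] :: t.drop (idx + 1)) = true := by
      rw [← List.drop_eq_getElem_cons h2]
      intro hc
      exact hm ((pvMatchAtA_eq t n idx 0 (by omega) (by omega)).mpr
        (by simpa using hc))
    have hgo : PySem.Chars.find.go n (t[idx] :: t.drop (idx + 1)) idx
        = PySem.Chars.find.go n (t.drop (idx + 1)) (idx + 1) := by
      simp only [PySem.Chars.find.go]
      rw [if_neg hp]
    rw [ih, List.drop_eq_getElem_cons h2]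
    simp only [hgo]
  | case3 idx h =>
    have hlt : (List.drop idx t).length < n.length := by
      rw [List.length_drop]; have := List.length_pos_iff.mpr hn; omega
    rw [go_eq_neg_one_of_short n hn _ idx hlt]
    simp

theorem contains_textA_eq (t n : List Char) :
    (contains_textA t n = 1) = (PySem.Chars.isIn n t = true) := by
  unfold contains_textA
  by_cases h0 : n.length = 0
  · have : n = [] := List.length_eq_zero_iff.mp h0
    subst this
    simp [PySem.Chars.isIn, PySem.Chars.find]
    cases t with
    | nil => simp [PySem.Chars.find.go]
    | cons a b => simp [PySem.Chars.find.go, List.isPrefixOf]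
  · have hn : n ≠ [] := by intro hc; subst hc; simp at h0
    by_cases h1 : n.length > t.length
    · simp only [h0, if_false, h1]
      rw [show PySem.Chars.isIn n t = false by
        simp [PySem.Chars.isIn, PySem.Chars.find, go_eq_neg_one_of_short n hn t 0 h1]]
      simp
    · simp only [h0, if_false, h1]
      rw [pvContainsLoopA_eq t n hn (by omega) 0]
      simp only [List.drop_zero, PySem.Chars.isIn, PySem.Chars.find]
      by_cases hgo : PySem.Chars.find.go n t 0 = -1 <;> simp [hgo]


theorem drop_takeWhile_length (cs : List Char) (p : Char → Bool) :
    cs.drop (cs.takeWhile p).length = cs.dropWhile p := by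
  induction cs with
  | nil => simp
  | cons h t ih => by_cases hp : p h <;> simp [hp, ih]

theorem takeWhile_length_le (cs : List Char) (p : Char → Bool) :
    (cs.takeWhile p).length ≤ cs.length := by
  simpa using (List.takeWhile_sublist p).length_le

theorem log_stripA_eq (cs : List Char) : log_stripA cs = pvStripSp cs := by
  unfold log_stripA pvStripSp
  have hs_eq : pvStripStartA cs 0 = (cs.takeWhile (· == ' ')).length := by
    simpa using pvStripStartA_eq cs 0
  have hsl : pvStripStartA cs 0 ≤ cs.length := by
    rw [hs_eq]; exact takeWhile_length_le cs _
  have hee : pvStripEndA cs (pvStripStartA cs 0) cs.length ≤ cs.length :=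
    pvStripEndA_le cs _ _
  rw [pvSubstrA_eq]
  have hmin : min ((pvStripEndA cs (pvStripStartA cs 0) cs.length : Nat) : Int)
      ((cs.length : Nat) : Int) = (pvStripEndA cs (pvStripStartA cs 0) cs.length : Int) := by
    omega
  rw [hmin]
  have htn : ((pvStripEndA cs (pvStripStartA cs 0) cs.length : Int)
      - (pvStripStartA cs 0 : Nat)).toNat
      = pvStripEndA cs (pvStripStartA cs 0) cs.length - pvStripStartA cs 0 := by omega
  rw [htn, pvStripEndA_take cs _ _ hsl le_rfl]
  have hfull : (cs.drop (pvStripStartA cs 0)).take (cs.length - pvStripStartA cs 0)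
      = cs.drop (pvStripStartA cs 0) := by
    rw [← List.length_drop]; exact List.take_length ..
  rw [hfull, hs_eq, drop_takeWhile_length]
  simp

theorem parse_messageA_eq (cs : List Char) : parse_messageA cs = pvMessageB cs := by
  unfold parse_messageA pvMessageB
  have hb : PySem.Chars.find cs [']'] = pvScanA ']' cs 0 := by
    rw [pvScanA_eq_go]; simp [PySem.Chars.find]
  rw [hb]
  by_cases hbe : pvScanA ']' cs 0 = -1
  · simp [hbe]
  · have hb0 : 0 ≤ pvScanA ']' cs 0 := by
      have := pvScanA_ge ']' cs 0; omega
    simp only [hbe, if_false]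
    have hslice : PySem.Chars.slice cs (some (pvScanA ']' cs 0 + 1)) none
        = cs.drop (pvScanA ']' cs 0 + 1).toNat := by
      exact PySem.List.slice_from cs (by omega)
    have hsub : pvSubstrA cs (pvScanA ']' cs 0 + 1).toNat (cs.length : Int) []
        = cs.drop (pvScanA ']' cs 0 + 1).toNat := by
      rw [pvSubstrA_eq]
      have h1 : min ((cs.length : Nat) : Int) ((cs.length : Nat) : Int) = (cs.length : Int) := by
        omega
      rw [h1]
      have h2 : ((cs.length : Int) - ((pvScanA ']' cs 0 + 1).toNat : Nat)).toNat
          = cs.length - (pvScanA ']' cs 0 + 1).toNat := by omega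
      rw [h2, ← List.length_drop]
      simp
    rw [hslice, hsub, log_stripA_eq]
    set rest := pvStripSp (cs.drop (pvScanA ']' cs 0 + 1).toNat) with hrest
    have hc : PySem.Chars.find rest [':'] = pvScanA ':' rest 0 := by
      rw [pvScanA_eq_go]; simp [PySem.Chars.find]
    rw [hc]
    by_cases hce : pvScanA ':' rest 0 = -1
    · simp [hce]
    · have hc0 : 0 ≤ pvScanA ':' rest 0 := by
        have := pvScanA_ge ':' rest 0; omega
      simp only [hce, if_false]
      have hslice2 : PySem.Chars.slice rest (some (pvScanA ':' rest 0 + 1)) none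
          = rest.drop (pvScanA ':' rest 0 + 1).toNat := by
        exact PySem.List.slice_from rest (by omega)
      have hsub2 : pvSubstrA rest (pvScanA ':' rest 0 + 1).toNat (rest.length : Int) []
          = rest.drop (pvScanA ':' rest 0 + 1).toNat := by
        rw [pvSubstrA_eq]
        have h1 : min ((rest.length : Nat) : Int) ((rest.length : Nat) : Int)
            = (rest.length : Int) := by omega
        rw [h1]
        have h2 : ((rest.length : Int) - ((pvScanA ':' rest 0 + 1).toNat : Nat)).toNat
            = rest.length - (pvScanA ':' rest 0 + 1).toNat := by omega
        rw [h2, ← List.length_drop]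
        simp
      rw [hslice2, hsub2, log_stripA_eq]

-- ===== VERDICT (by name: the statement is the Claim_ definition above) =====
theorem search_logs_spec : Claim_equal_search_logs := by
  intro lines search_term _
  unfold Spec_search_logs search_logs search_logs_alt
  simp only [contains_textA_eq, parse_messageA_eq]
  rw [PySem.List.foldl_append_if
    (fun line => PySem.Chars.isIn search_term.toList (pvMessageB line.toList))
    (fun line => line) lines []]
  simp
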